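-- pv_equiv track=rewrite | github.com/minhduc5a15/utc_code | Python/matranvuong3.py | row
-- ===== SOURCE A (Python) =====
-- def row(start, amount):
--     count = 0
--     arr = []
--     while count < amount:
--         arr.append(start)
--         start *= 2
--         count += 1
--     return arr
-- ===== SOURCE B (Python) =====
-- def row(start, amount):
--     if amount <= 0:
--         return []
--     if amount == 1:
--         return [start]
--     half = amount // 2
--     return row(start, half) + row(start * 2 ** half, amount - half)
-- ===== Notes on version B (the rewrite author's own statement) =====
-- stated objective: alternative
-- what changed: Replaces the linear while loop with a divide-and-conquer recursion: the row of length n is the row of length n//2 from start concatenated with the row of the remaining length from start*2**(n//2).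
import Mathlib
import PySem

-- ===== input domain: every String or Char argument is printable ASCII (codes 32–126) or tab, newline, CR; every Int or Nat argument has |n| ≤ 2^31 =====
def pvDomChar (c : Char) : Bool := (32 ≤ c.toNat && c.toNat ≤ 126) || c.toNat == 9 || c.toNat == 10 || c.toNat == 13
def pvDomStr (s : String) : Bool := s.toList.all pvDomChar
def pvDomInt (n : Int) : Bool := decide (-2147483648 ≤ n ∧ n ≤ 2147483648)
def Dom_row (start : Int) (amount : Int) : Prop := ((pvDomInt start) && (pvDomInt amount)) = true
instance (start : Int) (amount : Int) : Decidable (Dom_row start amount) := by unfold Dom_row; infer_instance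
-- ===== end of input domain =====

-- B replaces the linear while loop by a divide-and-conquer recursion (alternative decomposition; same cost).

-- ===== PORT A =====
-- while count < amount: arr.append(start); start *= 2; count += 1
def rowGo (start : Int) (count : Int) (amount : Int) (arr : List Int) : List Int :=
  if count < amount then rowGo (start * 2) (count + 1) amount (arr ++ [start]) else arr
termination_by (amount - count).toNat
decreasing_by omega

def row (start : Int) (amount : Int) : List Int := rowGo start 0 amount []

-- ===== PORT B =====
-- if amount <= 0: []; if amount == 1: [start]; half = amount // 2;
-- row(start, half) + row(start * 2 ** half, amount - half)
def row_alt (start : Int) (amount : Int) : List Int :=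
  if amount ≤ 0 then []
  else if amount = 1 then [start]
  else
    let half := PySem.Int.floordiv amount 2
    row_alt start half ++ row_alt (start * 2 ^ half.toNat) (amount - half)
termination_by amount.toNat
decreasing_by
  · have h := PySem.Int.floordiv_eq_ediv_of_pos (a := amount) (b := 2) (by omega)
    omega
  · have h := PySem.Int.floordiv_eq_ediv_of_pos (a := amount) (b := 2) (by omega)
    omega

-- ===== PRECONDITION & SPEC =====
def Spec_row (start : Int) (amount : Int) (out : List Int) : Prop := out = row_alt start amount
instance (start : Int) (amount : Int) (out : List Int) : Decidable (Spec_row start amount out) := by unfold Spec_row; infer_instance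

-- ===== CLAIM =====
def Claim_equal_row : Prop := ∀ (start : Int) (amount : Int), Dom_row start amount → Spec_row start amount (row start amount)

-- ===== LEMMAS AND PROOFS =====
lemma row_alt_eq_range (n : ℕ) : ∀ (start amount : Int), amount.toNat = n →
    row_alt start amount = (List.range n).map (fun k => start * 2 ^ k) := by
  induction n using Nat.strong_induction_on with
  | _ n ih =>
    intro start amount hn
    rw [row_alt]
    by_cases h0 : amount ≤ 0
    · simp [h0]; omega
    · by_cases h1 : amount = 1
      · subst h1
        simp at hn
        simp [← hn, List.range_one]
      · have h2 : (2:Int) ≤ amount := by omega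
        have hfd := PySem.Int.floordiv_eq_ediv_of_pos (a := amount) (b := 2) (by omega)
        set half := PySem.Int.floordiv amount 2 with hhalf
        have hb1 : 1 ≤ half := by omega
        have hb2 : half < amount := by omega
        simp only [h0, h1, if_false]
        rw [ih half.toNat (by omega) start half rfl,
            ih (amount - half).toNat (by omega) (start * 2 ^ half.toNat) (amount - half) rfl]
        have hsum : n = half.toNat + (amount - half).toNat := by omega
        rw [hsum, List.range_add, List.map_append, List.map_map]
        congr 1
        apply List.map_congr_left
        intro k _
        simp [Function.comp, pow_add]
        ring

lemma rowGo_eq (n : ℕ) : ∀ (start count amount : Int) (arr : List Int),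
    (amount - count).toNat = n →
    rowGo start count amount arr = arr ++ (List.range n).map (fun k => start * 2 ^ k) := by
  induction n with
  | zero =>
    intro start count amount arr h
    rw [rowGo]
    have : ¬ count < amount := by omega
    simp [this]
  | succ m ih =>
    intro start count amount arr h
    have hlt : count < amount := by omega
    rw [rowGo]
    simp only [hlt, if_pos]
    rw [ih (start * 2) (count + 1) amount (arr ++ [start]) (by omega)]
    rw [List.range_succ_eq_map]
    simp [List.map_map, Function.comp, pow_succ]
    intro _ _; ring

-- ===== VERDICT =====
theorem row_spec : Claim_equal_row := by
  intro start amount _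
  unfold Spec_row row
  rw [row_alt_eq_range amount.toNat start amount rfl,
      rowGo_eq amount.toNat start 0 amount [] (by omega)]
  simp
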